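-- pv_equiv track=rewrite | github.com/harneet2512/GenAI_Final | analysis/q3_image_generation.py | _summarize_manifest
-- ===== SOURCE A (Python) =====
-- from typing import Dict, List, Tuple, Optional
--
-- def _summarize_manifest(manifest: List[Dict]) -> Dict[str, Dict[str, int]]:
--     summary: Dict[str, Dict[str, int]] = {}
--     for record in manifest:
--         product = record["product_id"]
--         model = record["model"]
--         summary.setdefault(product, {}).setdefault(model, 0)
--         summary[product][model] += 1
--     return summary
-- ===== SOURCE B (Python) =====
-- def _summarize_manifest(manifest):
--     # declarative rebuild: list the distinct products and, per product, its distinct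
--     # models in first-occurrence order, and compute each count by scanning the key list
--     keys = [(r["product_id"], r["model"]) for r in manifest]
--     return {p: {m: keys.count((p, m))
--                 for m in dict.fromkeys(m2 for p2, m2 in keys if p2 == p)}
--             for p in dict.fromkeys(p2 for p2, _ in keys)}
-- ===== Notes on version B (the rewrite author's own statement) =====
-- stated objective: alternative
-- what changed: Replaces A's single-pass incremental nested-dict counting by a declarative rebuild: collect the (product, model) key list, derive the distinct products and per-product distinct models in first-occurrence order with dict.fromkeys, and compute every count independently by scanning the key list with list.count.
import Mathlib
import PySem

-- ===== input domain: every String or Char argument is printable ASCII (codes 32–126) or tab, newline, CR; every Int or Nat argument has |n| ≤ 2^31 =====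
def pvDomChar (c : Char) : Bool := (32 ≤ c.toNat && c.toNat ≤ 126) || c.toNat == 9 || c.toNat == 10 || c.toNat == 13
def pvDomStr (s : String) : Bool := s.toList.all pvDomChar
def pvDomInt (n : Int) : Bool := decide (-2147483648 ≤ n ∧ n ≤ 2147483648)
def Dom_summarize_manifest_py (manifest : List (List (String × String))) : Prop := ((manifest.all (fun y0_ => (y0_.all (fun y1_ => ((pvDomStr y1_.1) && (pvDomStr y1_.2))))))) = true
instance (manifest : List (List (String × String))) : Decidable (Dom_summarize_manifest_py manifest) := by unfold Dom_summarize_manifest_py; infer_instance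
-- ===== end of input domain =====

-- B replaces A's single-pass incremental nested-dict counting by a declarative rebuild:
-- distinct products / per-product distinct models in first-occurrence order, each count
-- recomputed by scanning the key list (objective: alternative; not faster). Equality is
-- about the RETURN value; neither program mutates its input.

-- ===== PORT A =====
-- record["product_id"] / record["model"] raise KeyError when the key is missing; Pre_ excludes
-- exactly those inputs, so the default "" passed to getD below is never consulted on admitted inputs.
def summarize_manifest_py (manifest : List (List (String × String))) : List (String × List (String × Int)) :=
  (manifest.foldl
    (fun summary record =>
      let product := (PySem.Dict.mk record).getD "product_id" ""
      let model := (PySem.Dict.mk record).getD "model" ""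
      -- summary.setdefault(product, {}).setdefault(model, 0); summary[product][model] += 1
      -- (the inner dict is aliased in Python; the insert below writes the updated inner dict back)
      let summary := summary.setdefault product PySem.Dict.empty
      let inner := (summary.getD product PySem.Dict.empty).setdefault model 0
      summary.insert product (inner.insert model (inner.getD model 0 + 1)))
    PySem.Dict.empty).items.map (fun q => (q.1, q.2.items))

-- ===== PORT B =====
-- dict.fromkeys = PySem.Set.ofList (first occurrences, in order); the two dict
-- comprehensions range over lists with no duplicate keys, so they are Dict.mk of the list.
def summarize_manifest_py_alt (manifest : List (List (String × String))) : List (String × List (String × Int)) :=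
  let keys := manifest.map (fun r => ((PySem.Dict.mk r).getD "product_id" "", (PySem.Dict.mk r).getD "model" ""))
  (PySem.Dict.mk ((PySem.Set.ofList (keys.map (·.1))).map (fun p =>
    (p, PySem.Dict.mk ((PySem.Set.ofList ((keys.filter (fun k => k.1 == p)).map (·.2))).map
          (fun m => (m, (keys.count (p, m) : Int)))))))).items.map (fun q => (q.1, q.2.items))

-- ===== PRECONDITION & SPEC =====
-- Pre_ excludes exactly the records missing a "product_id" or "model" key, on which A raises KeyError.
def Pre_summarize_manifest_py (manifest : List (List (String × String))) : Prop :=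
  ∀ r ∈ manifest, (PySem.Dict.mk r).contains "product_id" = true ∧ (PySem.Dict.mk r).contains "model" = true
instance (manifest : List (List (String × String))) : Decidable (Pre_summarize_manifest_py manifest) := by unfold Pre_summarize_manifest_py; infer_instance
def pvWitness_summarize_manifest_py : (List (List (String × String))) :=
  [[("product_id", "p1"), ("model", "m1")], [("product_id", "p1"), ("model", "m1")], [("product_id", "p2"), ("model", "m1")]]

def Spec_summarize_manifest_py (manifest : List (List (String × String))) (out : List (String × List (String × Int))) : Prop := out = summarize_manifest_py_alt manifest
instance (manifest : List (List (String × String))) (out : List (String × List (String × Int))) : Decidable (Spec_summarize_manifest_py manifest out) := by unfold Spec_summarize_manifest_py; infer_instance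

-- ===== CLAIM (what is proved, stated in full; the proofs are below) =====
def Claim_equal_summarize_manifest_py : Prop := ∀ (manifest : List (List (String × String))), Dom_summarize_manifest_py manifest → Pre_summarize_manifest_py manifest → Spec_summarize_manifest_py manifest (summarize_manifest_py manifest)

-- ===== LEMMAS AND PROOFS =====

-- the (product, model) key a record contributes
def pvKeyOf (r : List (String × String)) : String × String :=
  ((PySem.Dict.mk r).getD "product_id" "", (PySem.Dict.mk r).getD "model" "")

-- A's loop body, simplified to act on the key alone
def pvG (s : PySem.Dict String (PySem.Dict String Int)) (k : String × String) : PySem.Dict String (PySem.Dict String Int) :=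
  s.insert k.1 (((s.getD k.1 PySem.Dict.empty)).insert k.2 ((s.getD k.1 PySem.Dict.empty).getD k.2 0 + 1))

-- models contributed to product p, in order
def pvMs (ks : List (String × String)) (p : String) : List String :=
  (ks.filter (fun k => k.1 == p)).map (·.2)

-- the canonical value of A's summary dict
def pvCanon (ks : List (String × String)) : PySem.Dict String (PySem.Dict String Int) :=
  PySem.Dict.mk ((PySem.Set.ofList (ks.map (·.1))).map (fun p => (p, PySem.Dict.counter (pvMs ks p))))

lemma pvInsSimp {ν : Type} (s : PySem.Dict String ν) (p : String) (d : ν) (X : ν) :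
    (s.setdefault p d).insert p X = s.insert p X := by
  cases h : s.contains p with
  | true => rw [PySem.Dict.setdefault_of_contains s d h]
  | false => rw [PySem.Dict.setdefault_of_not_contains s d h, PySem.Dict.insert_insert_self]

lemma pvStepA_eq (s : PySem.Dict String (PySem.Dict String Int)) (r : List (String × String)) :
    (let product := (PySem.Dict.mk r).getD "product_id" ""
     let model := (PySem.Dict.mk r).getD "model" ""
     let summary := s.setdefault product PySem.Dict.empty
     let inner := (summary.getD product PySem.Dict.empty).setdefault model 0
     summary.insert product (inner.insert model (inner.getD model 0 + 1))) = pvG s (pvKeyOf r) := by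
  dsimp only [pvG, pvKeyOf]
  rw [PySem.Dict.getD_setdefault_self, pvInsSimp, pvInsSimp, PySem.Dict.getD_setdefault_self]

lemma pvMkMap_keys {ν : Type} (S : List String) (f : String → ν) :
    (PySem.Dict.mk (S.map (fun p => (p, f p)))).keys = S := by
  simp [PySem.Dict.keys_mk, List.map_map, Function.comp_def]

lemma pvMkMap_getD {ν : Type} (S : List String) (hS : S.Nodup) (f : String → ν) {p : String} (hp : p ∈ S) (d0 : ν) :
    (PySem.Dict.mk (S.map (fun p => (p, f p)))).getD p d0 = f p := by
  apply PySem.Dict.getD_of_mem_items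
  · exact List.mem_map_of_mem hp
  · rw [pvMkMap_keys]; exact hS

lemma pvMkMap_getD_not {ν : Type} (S : List String) (f : String → ν) {p : String} (hp : p ∉ S) (d0 : ν) :
    (PySem.Dict.mk (S.map (fun p => (p, f p)))).getD p d0 = d0 := by
  apply PySem.Dict.getD_of_not_contains
  rw [PySem.Dict.contains_eq_decide_mem_keys, pvMkMap_keys]
  simpa using hp

lemma pvMkMap_insert {ν : Type} (S : List String) (f : String → ν) (p₀ : String) (v : ν) :
    (PySem.Dict.mk (S.map (fun p => (p, f p)))).insert p₀ v
      = PySem.Dict.mk ((PySem.Set.add S p₀).map (fun p => (p, if p = p₀ then v else f p))) := by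
  by_cases h : p₀ ∈ S
  · have hc : (PySem.Dict.mk (S.map (fun p => (p, f p)))).contains p₀ = true := by
      rw [PySem.Dict.contains_eq_decide_mem_keys, pvMkMap_keys]; simpa
    apply PySem.Dict.ext
    rw [PySem.Dict.items_insert_of_contains _ _ hc, PySem.Set.add_of_mem h]
    show List.map _ (S.map (fun p => (p, f p))) = _
    rw [List.map_map]
    apply List.map_congr_left
    intro p _
    by_cases hp : p = p₀ <;> simp [hp]
  · have hc : (PySem.Dict.mk (S.map (fun p => (p, f p)))).contains p₀ = false := by
      rw [PySem.Dict.contains_eq_decide_mem_keys, pvMkMap_keys]; simpa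
    apply PySem.Dict.ext
    rw [PySem.Dict.items_insert_of_not_contains _ _ hc, PySem.Set.add_of_not_mem h]
    show (S.map (fun p => (p, f p))) ++ [(p₀, v)] = (S ++ [p₀]).map _
    rw [List.map_append]
    congr 1
    · apply List.map_congr_left
      intro p hp
      have : p ≠ p₀ := fun he => h (he ▸ hp)
      simp [this]
    · simp

lemma pvCounter_snoc (xs : List String) (x : String) :
    PySem.Dict.counter (xs ++ [x]) = (PySem.Dict.counter xs).insert x ((xs.count x : Int) + 1) := by
  rw [PySem.Dict.counter_append_singleton]
  have : ((PySem.Dict.counter xs).getD x 0) + 1 = (xs.count x : Int) + 1 := by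
    rw [PySem.Dict.getD_counter]
  rw [← this]
  rfl

lemma pvFilterNil (ks : List (String × String)) (p : String) (hp : p ∉ ks.map (·.1)) :
    ks.filter (fun k => k.1 == p) = [] := by
  rw [List.filter_eq_nil_iff]
  intro k hk
  simp only [beq_iff_eq]
  intro h
  exact hp (h ▸ List.mem_map_of_mem hk)

lemma pvCountPair (ks : List (String × String)) (p m : String) :
    ks.count (p, m) = (pvMs ks p).count m := by
  induction ks with
  | nil => rfl
  | cons k ks ih =>
    by_cases hk : k = (p, m)
    · subst hk
      simp [pvMs, ih] at *
    · rcases k with ⟨kp, km⟩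
      by_cases hp : kp = p
      · subst hp
        have hm : km ≠ m := by intro h; exact hk (by rw [h])
        simp [pvMs, hm, hk, ih] at *
      · simp [pvMs, hp, hk, ih] at *

-- characterization of A's fold
lemma pvACHar (ks : List (String × String)) : ks.foldl pvG PySem.Dict.empty = pvCanon ks := by
  induction ks using List.reverseRecOn with
  | nil => rfl
  | append_singleton ks k ih =>
    rw [List.foldl_append, List.foldl_cons, List.foldl_nil, ih]
    have hS : (PySem.Set.ofList (ks.map (·.1))).Nodup := PySem.Set.nodup_ofList _
    have hmsk : pvMs (ks ++ [k]) k.1 = pvMs ks k.1 ++ [k.2] := by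
      simp [pvMs, List.filter_append]
    have hkey : ((pvCanon ks).getD k.1 PySem.Dict.empty).insert k.2
        (((pvCanon ks).getD k.1 PySem.Dict.empty).getD k.2 0 + 1)
        = PySem.Dict.counter (pvMs (ks ++ [k]) k.1) := by
      rw [hmsk, pvCounter_snoc]
      by_cases hmem : k.1 ∈ ks.map (·.1)
      · rw [show (pvCanon ks).getD k.1 PySem.Dict.empty
            = PySem.Dict.counter (pvMs ks k.1) from
          pvMkMap_getD _ hS _ ((PySem.Set.mem_ofList _ _).mpr hmem) _]
        rw [PySem.Dict.getD_counter]
      · rw [show (pvCanon ks).getD k.1 PySem.Dict.empty = PySem.Dict.empty from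
          pvMkMap_getD_not _ _ (fun hc => hmem ((PySem.Set.mem_ofList _ _).mp hc)) _]
        have h0 : pvMs ks k.1 = [] := by
          unfold pvMs
          rw [pvFilterNil ks k.1 hmem]
          rfl
        rw [h0]
        simp
        rfl
    show (pvCanon ks).insert k.1 _ = pvCanon (ks ++ [k])
    rw [hkey]
    show (PySem.Dict.mk ((PySem.Set.ofList (ks.map (·.1))).map
        (fun p => (p, PySem.Dict.counter (pvMs ks p))))).insert k.1 _ = _
    rw [pvMkMap_insert]
    unfold pvCanon
    have hS' : PySem.Set.ofList ((ks ++ [k]).map (·.1))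
        = (PySem.Set.ofList (ks.map (·.1))).add k.1 := by
      rw [List.map_append, List.map_singleton, PySem.Set.ofList_append_singleton]
    rw [hS']
    congr 1
    apply List.map_congr_left
    intro p _
    by_cases hp : p = k.1
    · simp [hp]
    · have hms : pvMs (ks ++ [k]) p = pvMs ks p := by
        have : (k.1 == p) = false := by
          simp only [beq_eq_false_iff_ne]
          exact Ne.symm hp
        simp [pvMs, List.filter_append, this]
      simp [hp, hms]

-- ===== VERDICT (by name: the statement is the Claim_ definition above) =====
theorem summarize_manifest_py_spec : Claim_equal_summarize_manifest_py := by
  intro manifest _ _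
  unfold Spec_summarize_manifest_py summarize_manifest_py summarize_manifest_py_alt
  have hA : manifest.foldl
      (fun summary record =>
        let product := (PySem.Dict.mk record).getD "product_id" ""
        let model := (PySem.Dict.mk record).getD "model" ""
        let summary := summary.setdefault product PySem.Dict.empty
        let inner := (summary.getD product PySem.Dict.empty).setdefault model 0
        summary.insert product (inner.insert model (inner.getD model 0 + 1)))
      PySem.Dict.empty = pvCanon (manifest.map pvKeyOf) := by
    have hf : (fun (summary : PySem.Dict String (PySem.Dict String Int)) (record : List (String × String)) =>
        let product := (PySem.Dict.mk record).getD "product_id" ""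
        let model := (PySem.Dict.mk record).getD "model" ""
        let summary := summary.setdefault product PySem.Dict.empty
        let inner := (summary.getD product PySem.Dict.empty).setdefault model 0
        summary.insert product (inner.insert model (inner.getD model 0 + 1)))
        = fun s r => pvG s (pvKeyOf r) := by
      funext s r
      exact pvStepA_eq s r
    rw [hf, ← List.foldl_map (f := pvKeyOf) (g := pvG), pvACHar]
  rw [hA]
  show List.map (fun q => (q.1, q.2.items)) (pvCanon (manifest.map pvKeyOf)).items = _
  unfold pvCanon
  show List.map (fun q => (q.1, q.2.items))
      ((PySem.Set.ofList ((manifest.map pvKeyOf).map (·.1))).map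
        (fun p => (p, PySem.Dict.counter (pvMs (manifest.map pvKeyOf) p))))
    = List.map (fun q => (q.1, q.2.items))
      ((PySem.Set.ofList ((manifest.map pvKeyOf).map (·.1))).map (fun p =>
        (p, PySem.Dict.mk ((PySem.Set.ofList
              (((manifest.map pvKeyOf).filter (fun k => k.1 == p)).map (·.2))).map
          (fun m => (m, ((manifest.map pvKeyOf).count (p, m) : Int)))))))
  simp only [List.map_map]
  apply List.map_congr_left
  intro p _
  show (p, (PySem.Dict.counter (pvMs (manifest.map pvKeyOf) p)).items) = _
  rw [PySem.Dict.items_counter]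
  have hcnt : ∀ m, ((manifest.map pvKeyOf).count (p, m) : Int)
      = ((pvMs (manifest.map pvKeyOf) p).count m : Int) := by
    intro m
    rw [pvCountPair]
  show _ = (p, ((PySem.Set.ofList (pvMs (manifest.map pvKeyOf) p)).map
      (fun m => (m, ((manifest.map pvKeyOf).count (p, m) : Int)))))
  congr 1
  apply List.map_congr_left
  intro m _
  rw [hcnt]
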